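-- pv_equiv track=rewrite | github.com/amirhasrati/aoc-25 | aoc_3/aoc_3_part_1.py | max_bank_joltage
-- ===== SOURCE A (Python) =====
-- def max_bank_joltage(bank_joltage_rating: str) -> int:
--   # scan to find the largest joltage for the first battery
--   joltage_1: str = bank_joltage_rating[0]
--   battery_1_pos: int = 0
--   for i in range(1, len(bank_joltage_rating) - 1): # minus 1 because we cant have the first battery be the last battery in the bank
--     if bank_joltage_rating[i] > joltage_1:
--       joltage_1 = bank_joltage_rating[i]
--       battery_1_pos = i
--
--   # scan to find the largest joltage to the right of the first battery
--   joltage_2: str = bank_joltage_rating[battery_1_pos + 1]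
--   for i in range(battery_1_pos + 2, len(bank_joltage_rating)):
--     if bank_joltage_rating[i] > joltage_2:
--       joltage_2 = bank_joltage_rating[i]
--
--   return int(joltage_1 + joltage_2)
-- ===== SOURCE B (Python) =====
-- def max_bank_joltage(bank_joltage_rating: str) -> int:
--     # brute force: find the lexicographically largest ordered pair of battery
--     # characters (tuple comparison = comparing the two-digit reading), then read it
--     b1, b2 = bank_joltage_rating[0], bank_joltage_rating[1]
--     n = len(bank_joltage_rating)
--     for i in range(n):
--         for j in range(i + 1, n):
--             if (bank_joltage_rating[i], bank_joltage_rating[j]) > (b1, b2):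
--                 b1, b2 = bank_joltage_rating[i], bank_joltage_rating[j]
--     return int(b1 + b2)
-- ===== Notes on version B (the rewrite author's own statement) =====
-- stated objective: alternative
-- what changed: B replaces A's two greedy linear scans (largest character among all but the last, then largest character to its right) by a brute-force search over all ordered pairs i<j for the lexicographically largest pair (s[i], s[j]), read as an int once at the end.
import Mathlib
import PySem

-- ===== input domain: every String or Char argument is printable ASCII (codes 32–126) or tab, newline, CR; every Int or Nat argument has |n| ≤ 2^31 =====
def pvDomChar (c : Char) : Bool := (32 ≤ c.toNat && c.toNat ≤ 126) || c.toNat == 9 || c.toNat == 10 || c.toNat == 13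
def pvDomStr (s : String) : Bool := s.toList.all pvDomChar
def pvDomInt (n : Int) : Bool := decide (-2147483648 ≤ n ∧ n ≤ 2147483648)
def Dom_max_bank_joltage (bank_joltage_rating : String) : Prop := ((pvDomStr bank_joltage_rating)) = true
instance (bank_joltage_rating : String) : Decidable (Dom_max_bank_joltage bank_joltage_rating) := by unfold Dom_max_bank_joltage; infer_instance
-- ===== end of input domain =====

-- B finds the answer by brute force over all ordered pairs i < j (the lexicographically largest pair of characters, read as an int once at the end) instead of A's two greedy linear scans (objective: alternative; no speed claim).

-- ===== PORT A =====
def max_bank_joltage (bank_joltage_rating : String) : Int :=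
  let n : Int := PySem.Str.len bank_joltage_rating
  let joltage1 : Char := (PySem.Str.pyGet? bank_joltage_rating 0).getD ' '
  let st : Char × Int := (PySem.List.pyRange 1 (n - 1) 1).foldl
    (fun (st : Char × Int) i =>
      let c := (PySem.Str.pyGet? bank_joltage_rating i).getD ' '
      if st.1 < c then (c, i) else st) (joltage1, 0)
  let joltage2 : Char := (PySem.Str.pyGet? bank_joltage_rating (st.2 + 1)).getD ' '
  let j2 : Char := (PySem.List.pyRange (st.2 + 2) n 1).foldl
    (fun (j : Char) i =>
      let c := (PySem.Str.pyGet? bank_joltage_rating i).getD ' '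
      if j < c then c else j) joltage2
  (PySem.Int.ofStr? (String.ofList [st.1, j2])).getD 0

-- ===== PORT B =====
-- literal transliteration of Source B; Python's tuple '>' on pairs of one-char strings is the
-- lexicographic comparison written out: (x1,x2) > (b1,b2)  iff  b1 < x1 or (b1 = x1 and b2 < x2)
def max_bank_joltage_alt (bank_joltage_rating : String) : Int :=
  let b0 : Char × Char :=
    ((PySem.Str.pyGet? bank_joltage_rating 0).getD ' ',
     (PySem.Str.pyGet? bank_joltage_rating 1).getD ' ')   -- s[0], s[1]: IndexError (= none) is outside Pre_
  let n : Int := PySem.Str.len bank_joltage_rating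
  let b : Char × Char := (PySem.List.pyRange 0 n 1).foldl
    (fun (b : Char × Char) i =>
      (PySem.List.pyRange (i + 1) n 1).foldl
        (fun (b : Char × Char) j =>
          if b.1 < (PySem.Str.pyGet? bank_joltage_rating i).getD ' ' ∨
             (b.1 = (PySem.Str.pyGet? bank_joltage_rating i).getD ' ' ∧
              b.2 < (PySem.Str.pyGet? bank_joltage_rating j).getD ' ')
          then ((PySem.Str.pyGet? bank_joltage_rating i).getD ' ',
                (PySem.Str.pyGet? bank_joltage_rating j).getD ' ')
          else b) b) b0
  (PySem.Int.ofStr? (String.ofList [b.1, b.2])).getD 0   -- int(b1+b2): ValueError (= none) is outside Pre_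

-- ===== PRECONDITION & SPEC =====
-- closed-form description of the two characters A concatenates: the largest character among
-- all but the last (at its first occurrence), and the largest character to its right
def pvFst (l : List Char) : Char := l.dropLast.max?.getD ' '
def pvSnd (l : List Char) : Char := (l.drop (l.dropLast.idxOf (pvFst l) + 1)).max?.getD ' '

-- Pre_ = exactly the inputs on which A returns: length ≥ 2 (otherwise IndexError) and the two
-- selected characters parse as an int (otherwise ValueError)
def Pre_max_bank_joltage (bank_joltage_rating : String) : Prop :=
  2 ≤ bank_joltage_rating.toList.length ∧
    (PySem.Int.ofStr? (String.ofList
      [pvFst bank_joltage_rating.toList, pvSnd bank_joltage_rating.toList])).isSome = true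
instance (bank_joltage_rating : String) : Decidable (Pre_max_bank_joltage bank_joltage_rating) := by
  unfold Pre_max_bank_joltage; infer_instance

def pvWitness_max_bank_joltage : String := "21"

def Spec_max_bank_joltage (bank_joltage_rating : String) (out : Int) : Prop :=
  out = max_bank_joltage_alt bank_joltage_rating
instance (bank_joltage_rating : String) (out : Int) : Decidable (Spec_max_bank_joltage bank_joltage_rating out) := by
  unfold Spec_max_bank_joltage; infer_instance

-- ===== CLAIM (what is proved, stated in full; the proofs are below) =====
def Claim_equal_max_bank_joltage : Prop := ∀ (bank_joltage_rating : String), Dom_max_bank_joltage bank_joltage_rating → Pre_max_bank_joltage bank_joltage_rating → Spec_max_bank_joltage bank_joltage_rating (max_bank_joltage bank_joltage_rating)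

-- ===== LEMMAS AND PROOFS =====

-- lexicographic order on character pairs (what Python's tuple comparison uses)
def pvLexLe (a b : Char × Char) : Prop := a.1 < b.1 ∨ (a.1 = b.1 ∧ a.2 ≤ b.2)

theorem pv_lex_refl (a : Char × Char) : pvLexLe a a := Or.inr ⟨rfl, le_refl _⟩

theorem pv_lex_trans {a b c : Char × Char} (h1 : pvLexLe a b) (h2 : pvLexLe b c) : pvLexLe a c := by
  rcases h1 with h1 | ⟨h1, h1'⟩ <;> rcases h2 with h2 | ⟨h2, h2'⟩
  · exact Or.inl (lt_trans h1 h2)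
  · exact Or.inl (h2 ▸ h1)
  · exact Or.inl (h1 ▸ h2)
  · exact Or.inr ⟨h1.trans h2, le_trans h1' h2'⟩

theorem pv_lex_antisymm {a b : Char × Char} (h1 : pvLexLe a b) (h2 : pvLexLe b a) : a = b := by
  rcases h1 with h1 | ⟨h1, h1'⟩ <;> rcases h2 with h2 | ⟨h2, h2'⟩
  · exact absurd h2 (lt_asymm h1)
  · exact absurd h1 (h2 ▸ lt_irrefl _)
  · exact absurd h2 (h1 ▸ lt_irrefl _)
  · exact Prod.ext h1 (le_antisymm h1' h2')

-- loop 1 invariant: after scanning indices 1..k-1, the state is (max of prefix of length k, its first index)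
theorem pv_loop1 (s : String) (k : Nat) (hk1 : 1 ≤ k) (hk : k ≤ s.toList.length) :
    ∃ (c : Char) (p : Nat),
      (PySem.List.pyRange 1 (k : Int) 1).foldl
        (fun (st : Char × Int) i =>
          if st.1 < (PySem.Str.pyGet? s i).getD ' ' then ((PySem.Str.pyGet? s i).getD ' ', i) else st)
        ((PySem.Str.pyGet? s 0).getD ' ', 0) = (c, (p : Int)) ∧
      p < k ∧ s.toList.getD p ' ' = c ∧
      (∀ m < k, s.toList.getD m ' ' ≤ c) ∧
      (∀ m < p, s.toList.getD m ' ' < c) := by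
  induction k, hk1 using Nat.le_induction with
  | base =>
    refine ⟨(PySem.Str.pyGet? s 0).getD ' ', 0, ?_, ?_, ?_, ?_, ?_⟩
    · rw [PySem.List.pyRange_one_eq_nil (by norm_num)]; rfl
    · omega
    · have h0 : (0 : Int) = ((0 : Nat) : Int) := rfl
      rw [h0, PySem.Str.pyGet?_natCast]
      simp [List.getD_eq_getElem?_getD]
    · intro m hm
      have : m = 0 := by omega
      subst this
      have h0 : (0 : Int) = ((0 : Nat) : Int) := rfl
      rw [h0, PySem.Str.pyGet?_natCast]
      simp [List.getD_eq_getElem?_getD]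
    · intro m hm; omega
  | succ k hk1 ih =>
    obtain ⟨c, p, heq, hpk, hcp, hub, hfirst⟩ := ih (by omega)
    have hcast : ((k + 1 : Nat) : Int) = (k : Int) + 1 := by push_cast; ring
    rw [hcast, PySem.List.pyRange_one_succ_right (by exact_mod_cast hk1), List.foldl_append, heq]
    have hget : (PySem.Str.pyGet? s (k : Int)).getD ' ' = s.toList.getD k ' ' := by
      rw [PySem.Str.pyGet?_natCast]; simp [List.getD_eq_getElem?_getD]
    simp only [List.foldl_cons, List.foldl_nil, hget]
    by_cases hlt : c < s.toList.getD k ' '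
    · refine ⟨s.toList.getD k ' ', k, by rw [if_pos hlt], by omega, rfl, ?_, ?_⟩
      · intro m hm
        rcases Nat.lt_succ_iff_lt_or_eq.mp hm with h | h
        · exact le_of_lt (lt_of_le_of_lt (hub m h) hlt)
        · subst h; exact le_refl _
      · intro m hm
        exact lt_of_le_of_lt (hub m (by omega)) hlt
    · refine ⟨c, p, by rw [if_neg hlt], by omega, hcp, ?_, hfirst⟩
      intro m hm
      rcases Nat.lt_succ_iff_lt_or_eq.mp hm with h | h
      · exact hub m h
      · subst h; exact le_of_not_gt hlt

-- loop 2 invariant: running max of s[p+1..k-1] starting from s[p+1]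
theorem pv_loop2 (s : String) (p : Nat) (k : Nat) (hpk : p + 2 ≤ k) (hk : k ≤ s.toList.length) :
    ∃ (c : Char),
      (PySem.List.pyRange ((p : Int) + 2) (k : Int) 1).foldl
        (fun (j : Char) i =>
          if j < (PySem.Str.pyGet? s i).getD ' ' then (PySem.Str.pyGet? s i).getD ' ' else j)
        ((PySem.Str.pyGet? s ((p : Int) + 1)).getD ' ') = c ∧
      (∃ m, p + 1 ≤ m ∧ m < k ∧ s.toList.getD m ' ' = c) ∧
      (∀ m, p + 1 ≤ m → m < k → s.toList.getD m ' ' ≤ c) := by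
  have hget : ∀ t : Nat, (PySem.Str.pyGet? s (t : Int)).getD ' ' = s.toList.getD t ' ' := by
    intro t; rw [PySem.Str.pyGet?_natCast]; simp [List.getD_eq_getElem?_getD]
  induction k, hpk using Nat.le_induction with
  | base =>
    refine ⟨s.toList.getD (p + 1) ' ', ?_, ⟨p + 1, by omega, by omega, rfl⟩, ?_⟩
    · rw [PySem.List.pyRange_one_eq_nil (by push_cast; omega)]
      have : (p : Int) + 1 = ((p + 1 : Nat) : Int) := by push_cast; ring
      rw [this, hget]
      rfl
    · intro m h1 h2
      have : m = p + 1 := by omega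
      subst this; exact le_refl _
  | succ k hk1 ih =>
    obtain ⟨c, heq, ⟨m0, hm1, hm2, hm3⟩, hub⟩ := ih (by omega)
    have hcast : ((k + 1 : Nat) : Int) = (k : Int) + 1 := by push_cast; ring
    rw [hcast, PySem.List.pyRange_one_succ_right (by omega), List.foldl_append, heq]
    simp only [List.foldl_cons, List.foldl_nil, hget k]
    by_cases hlt : c < s.toList.getD k ' '
    · refine ⟨s.toList.getD k ' ', by rw [if_pos hlt], ⟨k, by omega, by omega, rfl⟩, ?_⟩
      intro m h1 h2
      rcases Nat.lt_succ_iff_lt_or_eq.mp h2 with h | h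
      · exact le_of_lt (lt_of_le_of_lt (hub m h1 h) hlt)
      · subst h; exact le_refl _
    · refine ⟨c, by rw [if_neg hlt], ⟨m0, hm1, by omega, hm3⟩, ?_⟩
      intro m h1 h2
      rcases Nat.lt_succ_iff_lt_or_eq.mp h2 with h | h
      · exact hub m h1 h
      · subst h; exact le_of_not_gt hlt

-- inner loop of B: for a fixed i, folding over j in [i+1, k) keeps a lexicographic running max
theorem pv_inner (s : String) (i : Nat) (b : Char × Char) (k : Nat) (hik : i + 1 ≤ k)
    (hk : k ≤ s.toList.length) :
    ∃ b' : Char × Char,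
      (PySem.List.pyRange ((i : Int) + 1) (k : Int) 1).foldl
        (fun (b : Char × Char) j =>
          if b.1 < (PySem.Str.pyGet? s (i : Int)).getD ' ' ∨
             (b.1 = (PySem.Str.pyGet? s (i : Int)).getD ' ' ∧
              b.2 < (PySem.Str.pyGet? s j).getD ' ')
          then ((PySem.Str.pyGet? s (i : Int)).getD ' ', (PySem.Str.pyGet? s j).getD ' ')
          else b) b = b' ∧
      pvLexLe b b' ∧
      (∀ j, i + 1 ≤ j → j < k → pvLexLe (s.toList.getD i ' ', s.toList.getD j ' ') b') ∧
      (b' = b ∨ ∃ j, i + 1 ≤ j ∧ j < k ∧ b' = (s.toList.getD i ' ', s.toList.getD j ' ')) := by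
  have hget : ∀ t : Nat, (PySem.Str.pyGet? s (t : Int)).getD ' ' = s.toList.getD t ' ' := by
    intro t; rw [PySem.Str.pyGet?_natCast]; simp [List.getD_eq_getElem?_getD]
  induction k, hik using Nat.le_induction with
  | base =>
    refine ⟨b, ?_, pv_lex_refl b, ?_, Or.inl rfl⟩
    · rw [show ((i + 1 : Nat) : Int) = (i : Int) + 1 by push_cast; ring,
        PySem.List.pyRange_one_eq_nil (le_refl _)]
      rfl
    · intro j h1 h2; exfalso; omega
  | succ k hk1 ih =>
    obtain ⟨b', heq, hle, hub, hat⟩ := ih (by omega)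
    have hcast : ((k + 1 : Nat) : Int) = (k : Int) + 1 := by push_cast; ring
    rw [hcast, PySem.List.pyRange_one_succ_right (by omega), List.foldl_append, heq]
    simp only [List.foldl_cons, List.foldl_nil, hget]
    by_cases hc : b'.1 < s.toList.getD i ' ' ∨
        (b'.1 = s.toList.getD i ' ' ∧ b'.2 < s.toList.getD k ' ')
    · rw [if_pos hc]
      have hstep : pvLexLe b' (s.toList.getD i ' ', s.toList.getD k ' ') := by
        rcases hc with h | ⟨h, h'⟩
        · exact Or.inl h
        · exact Or.inr ⟨h, le_of_lt h'⟩
      refine ⟨_, rfl, pv_lex_trans hle hstep, ?_, Or.inr ⟨k, by omega, by omega, rfl⟩⟩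
      intro j h1 h2
      rcases Nat.lt_succ_iff_lt_or_eq.mp h2 with h | h
      · exact pv_lex_trans (hub j h1 h) hstep
      · subst h; exact pv_lex_refl _
    · rw [if_neg hc]
      refine ⟨b', rfl, hle, ?_, ?_⟩
      · intro j h1 h2
        rcases Nat.lt_succ_iff_lt_or_eq.mp h2 with h | h
        · exact hub j h1 h
        · subst h
          have hle1 : s.toList.getD i ' ' ≤ b'.1 := le_of_not_gt (fun hgt => hc (Or.inl hgt))
          rcases lt_or_eq_of_le hle1 with hlt | heqq
          · exact Or.inl hlt
          · exact Or.inr ⟨heqq, le_of_not_gt (fun hgt => hc (Or.inr ⟨heqq.symm, hgt⟩))⟩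
      · rcases hat with h | ⟨j, hj1, hj2, hj3⟩
        · exact Or.inl h
        · exact Or.inr ⟨j, hj1, by omega, hj3⟩

-- outer loop of B: after the first k outer iterations the state dominates every pair (i, j), i < k
theorem pv_outer (s : String) (k : Nat) (hk : k ≤ s.toList.length) :
    ∃ b : Char × Char,
      (PySem.List.pyRange 0 (k : Int) 1).foldl
        (fun (b : Char × Char) i =>
          (PySem.List.pyRange (i + 1) (s.toList.length : Int) 1).foldl
            (fun (b : Char × Char) j =>
              if b.1 < (PySem.Str.pyGet? s i).getD ' ' ∨
                 (b.1 = (PySem.Str.pyGet? s i).getD ' ' ∧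
                  b.2 < (PySem.Str.pyGet? s j).getD ' ')
              then ((PySem.Str.pyGet? s i).getD ' ', (PySem.Str.pyGet? s j).getD ' ')
              else b) b)
        ((PySem.Str.pyGet? s 0).getD ' ', (PySem.Str.pyGet? s 1).getD ' ') = b ∧
      (∀ i j, i < k → i < j → j < s.toList.length →
        pvLexLe (s.toList.getD i ' ', s.toList.getD j ' ') b) ∧
      (b = ((PySem.Str.pyGet? s 0).getD ' ', (PySem.Str.pyGet? s 1).getD ' ') ∨
        ∃ i j, i < j ∧ j < s.toList.length ∧ b = (s.toList.getD i ' ', s.toList.getD j ' ')) := by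
  induction k with
  | zero =>
    refine ⟨_, ?_, ?_, Or.inl rfl⟩
    · rw [show ((0 : Nat) : Int) = (0 : Int) by norm_num,
        PySem.List.pyRange_one_eq_nil (le_refl _)]
      rfl
    · intro i j h1 _ _; exfalso; omega
  | succ k ih =>
    obtain ⟨b, heq, hub, hat⟩ := ih (by omega)
    have hcast : ((k + 1 : Nat) : Int) = (k : Int) + 1 := by push_cast; ring
    rw [hcast, PySem.List.pyRange_one_succ_right (by positivity), List.foldl_append, heq]
    simp only [List.foldl_cons, List.foldl_nil]
    obtain ⟨b', heq', hle', hub', hat'⟩ :=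
      pv_inner s k b s.toList.length (by omega) (le_refl _)
    rw [heq']
    refine ⟨b', rfl, ?_, ?_⟩
    · intro i j h1 h2 h3
      rcases Nat.lt_succ_iff_lt_or_eq.mp h1 with h | h
      · exact pv_lex_trans (hub i j h h2 h3) hle'
      · subst h; exact hub' j (by omega) h3
    · rcases hat' with h | ⟨j, hj1, hj2, hj3⟩
      · rw [h]; exact hat
      · exact Or.inr ⟨k, j, by omega, hj2, hj3⟩

-- ===== MAIN =====
theorem pv_main (s : String) (hlen : 2 ≤ s.toList.length) :
    max_bank_joltage s = max_bank_joltage_alt s := by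
  have hget : ∀ t : Nat, (PySem.Str.pyGet? s (t : Int)).getD ' ' = s.toList.getD t ' ' := by
    intro t; rw [PySem.Str.pyGet?_natCast]; simp [List.getD_eq_getElem?_getD]
  obtain ⟨c1, p, heq1, hpk, hcp, hub1, hfirst⟩ :=
    pv_loop1 s (s.toList.length - 1) (by omega) (by omega)
  obtain ⟨c2, heq2, ⟨m2, hm2a, hm2b, hm2c⟩, hub2⟩ :=
    pv_loop2 s p s.toList.length (by omega) (le_refl _)
  have hA : max_bank_joltage s = (PySem.Int.ofStr? (String.ofList [c1, c2])).getD 0 := by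
    simp only [max_bank_joltage, PySem.Str.len_eq]
    have hcast : (s.toList.length : Int) - 1 = ((s.toList.length - 1 : Nat) : Int) := by omega
    rw [hcast, heq1]
    rw [heq2]
  obtain ⟨bf, hbeq, hubf, hatf⟩ := pv_outer s s.toList.length (le_refl _)
  have hB : max_bank_joltage_alt s
      = (PySem.Int.ofStr? (String.ofList [bf.1, bf.2])).getD 0 := by
    simp only [max_bank_joltage_alt, PySem.Str.len_eq]
    rw [hbeq]
  -- every ordered pair is lexicographically at most (c1, c2)
  have hpair : ∀ i j, i < j → j < s.toList.length →
      pvLexLe (s.toList.getD i ' ', s.toList.getD j ' ') (c1, c2) := by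
    intro i j hij hj
    have hile : s.toList.getD i ' ' ≤ c1 := hub1 i (by omega)
    rcases lt_or_eq_of_le hile with hlt | heqc
    · exact Or.inl hlt
    · have hpi : p ≤ i := by
        by_contra hcon
        exact absurd (heqc ▸ hfirst i (by omega)) (lt_irrefl _)
      exact Or.inr ⟨heqc, hub2 j (by omega) hj⟩
  -- the two selections coincide
  have hbc : bf = (c1, c2) := by
    refine pv_lex_antisymm ?_ ?_
    · rcases hatf with h | ⟨i, j, hij, hj, h⟩
      · rw [h, show (0 : Int) = ((0 : Nat) : Int) from rfl,
          show (1 : Int) = ((1 : Nat) : Int) from rfl, hget 0, hget 1]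
        exact hpair 0 1 (by omega) (by omega)
      · rw [h]; exact hpair i j hij hj
    · have := hubf p m2 (by omega) (by omega) hm2b
      rwa [hcp, hm2c] at this
  rw [hA, hB, hbc]

-- ===== VERDICT (by name: the statement is the Claim_ definition above) =====
theorem max_bank_joltage_spec : Claim_equal_max_bank_joltage := by
  intro s _ hpre
  show max_bank_joltage s = max_bank_joltage_alt s
  exact pv_main s hpre.1
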